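-- pv_equiv track=rewrite | github.com/EnAnsari/quera | bank/220/main.py | countBinaries
-- ===== SOURCE A (Python) =====
-- def countBinaries(N):
-- 	powersOfTwo = [0] * 11
-- 	powersOfTwo[0] = 1
-- 	for i in range(1, 11):
-- 		powersOfTwo[i] = powersOfTwo[i - 1] * 2
-- 	ctr = 1
-- 	ans = 0
--
-- 	while (N > 0):
-- 		if (N % 10 == 1):
-- 			ans += powersOfTwo[ctr - 1]
-- 		elif (N % 10 > 1):
-- 			ans = powersOfTwo[ctr] - 1
-- 		ctr += 1
-- 		N = N // 10
-- 	return ans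
-- ===== SOURCE B (Python) =====
-- def countBinaries(N):
--     digs = []
--     while N > 0:
--         digs.append(N % 10)
--         N //= 10
--     r = 0
--     for i, d in reversed(list(enumerate(digs))):
--         if d > 1:
--             return r + 2 ** (i + 1) - 1
--         if d == 1:
--             r += 2 ** i
--     return r
-- ===== Notes on version B (the rewrite author's own statement) =====
-- stated objective: alternative
-- what changed: Replaces A's LSB-first accumulate-and-reset loop (power table plus an accumulator that is overwritten whenever a digit exceeds one) by extracting the decimal digits once and then scanning them from the most significant digit down, returning early with an all-ones suffix value at the first digit exceeding one.
import Mathlib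
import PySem

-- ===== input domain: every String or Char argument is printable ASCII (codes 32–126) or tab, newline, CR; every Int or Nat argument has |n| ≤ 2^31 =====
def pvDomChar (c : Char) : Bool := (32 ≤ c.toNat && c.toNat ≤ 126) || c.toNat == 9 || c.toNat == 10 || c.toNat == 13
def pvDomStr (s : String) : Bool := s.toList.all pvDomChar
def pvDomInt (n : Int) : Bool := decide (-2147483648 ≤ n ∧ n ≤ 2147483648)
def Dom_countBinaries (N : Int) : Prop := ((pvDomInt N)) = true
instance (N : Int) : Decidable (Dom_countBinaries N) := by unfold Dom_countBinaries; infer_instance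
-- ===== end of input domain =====

-- B extracts the digits once and scans them from the most significant digit down with an
-- early return at the first digit exceeding one, instead of A's LSB-first accumulate-and-reset loop.

-- ===== PORT A =====
-- the powersOfTwo table A builds with its range(1, 11) loop
def pvPows : List Int :=
  (PySem.List.pyRange 1 11 1).foldl
    (fun p i => p.set i.toNat (p.getD (i.toNat - 1) 0 * 2))
    ((List.replicate 11 (0 : Int)).set 0 1)

-- A's while loop, step for step
def countBinariesLoop (N ctr ans : Int) : Int :=
  if 0 < N then
    let ans' :=
      if PySem.Int.mod N 10 = 1 then ans + pvPows.getD (ctr - 1).toNat 0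
      else if 1 < PySem.Int.mod N 10 then pvPows.getD ctr.toNat 0 - 1
      else ans
    countBinariesLoop (PySem.Int.floordiv N 10) (ctr + 1) ans'
  else ans
termination_by N.toNat
decreasing_by
  have := PySem.Int.floordiv_eq_ediv_of_pos (a := N) (b := 10) (by norm_num)
  omega

def countBinaries (N : Int) : Int := countBinariesLoop N 1 0

-- ===== PORT B =====
-- the digit-extraction while loop of B
def pvDigits (N : Int) : List Int :=
  if 0 < N then PySem.Int.mod N 10 :: pvDigits (PySem.Int.floordiv N 10) else []
termination_by N.toNat
decreasing_by
  have := PySem.Int.floordiv_eq_ediv_of_pos (a := N) (b := 10) (by norm_num)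
  omega

-- B's for loop over reversed(list(enumerate(digs))) with its early return
def pvScan (r : Int) : List (Int × Int) → Int
  | [] => r
  | (i, d) :: rest =>
    if 1 < d then r + 2 ^ (i + 1).toNat - 1
    else if d = 1 then pvScan (r + 2 ^ i.toNat) rest
    else pvScan r rest

def countBinaries_alt (N : Int) : Int :=
  pvScan 0 (PySem.List.enumerate (pvDigits N) 0).reverse

-- ===== PRECONDITION & SPEC =====
def Spec_countBinaries (N : Int) (out : Int) : Prop := out = countBinaries_alt N
instance (N : Int) (out : Int) : Decidable (Spec_countBinaries N out) := by unfold Spec_countBinaries; infer_instance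

-- ===== CLAIM (what is proved, stated in full; the proofs are below) =====
def Claim_equal_countBinaries : Prop := ∀ (N : Int), Dom_countBinaries N → Spec_countBinaries N (countBinaries N)

-- ===== LEMMAS AND PROOFS =====

-- A's loop viewed as a fold over the digit list
def pvGA : List Int → Int → Int → Int
  | [], _, ans => ans
  | d :: ds, ctr, ans =>
      pvGA ds (ctr + 1)
        (if d = 1 then ans + pvPows.getD (ctr - 1).toNat 0
         else if 1 < d then pvPows.getD ctr.toNat 0 - 1
         else ans)

theorem loop_eq_gA (N ctr ans : Int) :
    countBinariesLoop N ctr ans = pvGA (pvDigits N) ctr ans := by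
  induction N using pvDigits.induct generalizing ctr ans with
  | case1 N h ih =>
      rw [countBinariesLoop, pvDigits]
      simp only [h, if_pos, pvGA]
      exact ih _ _
  | case2 N h =>
      rw [countBinariesLoop, pvDigits]
      simp [h, pvGA]

theorem pvPows_eq : pvPows = [1, 2, 4, 8, 16, 32, 64, 128, 256, 512, 1024] := by decide

theorem pvPows_getD (k : Nat) (hk : k ≤ 10) : pvPows.getD k 0 = 2 ^ k := by
  rw [pvPows_eq]; interval_cases k <;> decide

theorem gA_append (xs ys : List Int) (ctr ans : Int) :
    pvGA (xs ++ ys) ctr ans = pvGA ys (ctr + (xs.length : Int)) (pvGA xs ctr ans) := by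
  induction xs generalizing ctr ans with
  | nil => simp [pvGA]
  | cons d ds ih =>
      simp only [List.cons_append, pvGA, ih, List.length_cons]
      congr 1
      push_cast
      ring

theorem pvScan_add (l : List (Int × Int)) (r : Int) : pvScan r l = r + pvScan 0 l := by
  induction l generalizing r with
  | nil => simp [pvScan]
  | cons p rest ih =>
      obtain ⟨i, d⟩ := p
      by_cases h1 : 1 < d
      · simp [pvScan, h1]; ring
      · by_cases h2 : d = 1
        · simp only [pvScan, if_neg h1, if_pos h2]
          rw [ih, ih (0 + 2 ^ i.toNat)]
          ring
        · simp only [pvScan, if_neg h1, if_neg h2]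
          exact ih r

theorem gA_main (ds : List Int) (hlen : ds.length ≤ 10) (ans : Int) :
    pvGA ds 1 ans =
      (if ds.any (fun d => decide (1 < d)) then 0 else ans) +
        pvScan 0 (PySem.List.enumerate ds 0).reverse := by
  induction ds using List.reverseRecOn generalizing ans with
  | nil => simp [pvGA, pvScan, PySem.List.enumerate]
  | append_singleton ds d ih =>
      have hds : ds.length ≤ 9 := by simp at hlen; omega
      rw [gA_append]
      rw [PySem.List.enumerate_append]
      simp only [PySem.List.enumerate_cons, PySem.List.enumerate_nil, List.reverse_append,
        List.reverse_cons, List.reverse_nil, List.nil_append, List.cons_append]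
      have hm1 : ((1 : Int) + (ds.length : Int) - 1).toNat = ds.length := by omega
      have hm2 : ((1 : Int) + (ds.length : Int)).toNat = ds.length + 1 := by omega
      have hm3 : ((0 : Int) + (ds.length : Int) + 1).toNat = ds.length + 1 := by omega
      have hm4 : ((0 : Int) + (ds.length : Int)).toNat = ds.length := by omega
      by_cases h1 : 1 < d
      · have hd1 : ¬ d = 1 := by omega
        have hany : ((ds ++ [d]).any fun x => decide (1 < x)) = true := by
          simp [List.any_append, h1]
        simp only [pvGA, pvScan, if_pos h1, if_neg hd1, hm2, hm3, hany, if_true]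
        rw [pvPows_getD (ds.length + 1) (by omega)]
        ring
      · by_cases h2 : d = 1
        · subst h2
          have hany : ((ds ++ [1]).any fun x => decide (1 < x)) = (ds.any fun x => decide (1 < x)) := by
            simp [List.any_append]
          simp only [pvGA, pvScan, hm1, hm4, hany]
          rw [pvPows_getD ds.length (by omega), ih (by omega),
            pvScan_add ((PySem.List.enumerate ds 0).reverse) (0 + 2 ^ ds.length)]
          norm_num
          by_cases ha : ∃ x ∈ ds, 1 < x <;> simp [ha] <;> ring
        · have hany : ((ds ++ [d]).any fun x => decide (1 < x)) = (ds.any fun x => decide (1 < x)) := by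
            simp [List.any_append, h1]
          simp only [pvGA, pvScan, if_neg h1, if_neg h2, hm4, hany]
          rw [ih (by omega)]

theorem pvDigits_len : ∀ (k : Nat) (N : Int), N < 10 ^ k → (pvDigits N).length ≤ k := by
  intro k
  induction k with
  | zero =>
      intro N hN
      rw [pvDigits]
      simp only [pow_zero] at hN
      simp [show ¬ 0 < N by omega]
  | succ k ih =>
      intro N hN
      rw [pvDigits]
      by_cases h : 0 < N
      · simp only [if_pos h, List.length_cons]
        have hdiv := PySem.Int.floordiv_eq_ediv_of_pos (a := N) (b := 10) (by norm_num)
        have hp : (10 : Int) ^ (k + 1) = 10 * 10 ^ k := by ring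
        have hpos : (0 : Int) < 10 ^ k := by positivity
        have hlt : PySem.Int.floordiv N 10 < 10 ^ k := by
          rw [hdiv]; rw [hp] at hN; omega
        have := ih _ hlt
        omega
      · simp [h]

-- ===== VERDICT (by name: the statement is the Claim_ definition above) =====
theorem countBinaries_spec : Claim_equal_countBinaries := by
  intro N hDom
  unfold Spec_countBinaries countBinaries countBinaries_alt
  rw [loop_eq_gA]
  have hN : N < 10 ^ (10 : Nat) := by
    have : N ≤ 2147483648 := by
      simp [Dom_countBinaries, pvDomInt] at hDom; omega
    calc N ≤ 2147483648 := this
      _ < 10 ^ (10 : Nat) := by norm_num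
  rw [gA_main _ (pvDigits_len 10 N hN) 0]
  by_cases h : (pvDigits N).any (fun d => decide (1 < d)) <;> simp [h]
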